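-- pv_equiv track=rewrite | github.com/GeorgelPreput/pushcart | src/pushcart/configuration.py | _get_multiple_validations_with_same_rule
-- ===== SOURCE A (Python) =====
-- from itertools import groupby
--
-- def _get_multiple_validations_with_same_rule(validations):
--     """
--     Group a list of validations by their rule and return only the groups that have more
--     than one validation with the same rule.
--
--     Inputs:
--     - validations: a list of dictionaries containing validation rules and actions.
--
--     Flow:
--     1. The function uses the groupby function from itertools to group the validations
--        by their rule.
--     2. For each group, it creates a list of validation actions.
--     3. It returns a dictionary with the rule as the key and the list of validation
--        actions as the value, but only for groups with more than one validation.
--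
--     Outputs:
--     - A dictionary with the rule as the key and a list of validation actions as the
--       value for groups with more than one validation.
--
--     Additional aspects:
--     - The function uses the strip() method to remove any leading or trailing whitespace
--       from the rule before grouping.
--     - The function sorts the validations list by rule.
--     """
--
--     validation_groups = {
--         k: [v["validation_action"] for v in v]
--         for k, v in groupby(
--             sorted(validations, key=lambda v: str(v["validation_rule"]).strip()),
--             lambda r: str(r["validation_rule"]).strip(),
--         )
--     }
--
--     return {k: v for k, v in validation_groups.items() if len(v) > 1}
-- ===== SOURCE B (Python) =====
-- def _get_multiple_validations_with_same_rule(validations):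
--     groups = {}
--     for v in validations:
--         groups.setdefault(str(v["validation_rule"]).strip(), []).append(v["validation_action"])
--     return {k: groups[k] for k in sorted(groups) if len(groups[k]) > 1}
-- ===== Notes on version B (the rewrite author's own statement) =====
-- stated objective: idiomatic
-- what changed: Replaces sort-the-whole-list-then-itertools.groupby with a single dict.setdefault grouping pass over the unsorted input followed by one sort of the distinct rule keys.
import Mathlib
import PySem

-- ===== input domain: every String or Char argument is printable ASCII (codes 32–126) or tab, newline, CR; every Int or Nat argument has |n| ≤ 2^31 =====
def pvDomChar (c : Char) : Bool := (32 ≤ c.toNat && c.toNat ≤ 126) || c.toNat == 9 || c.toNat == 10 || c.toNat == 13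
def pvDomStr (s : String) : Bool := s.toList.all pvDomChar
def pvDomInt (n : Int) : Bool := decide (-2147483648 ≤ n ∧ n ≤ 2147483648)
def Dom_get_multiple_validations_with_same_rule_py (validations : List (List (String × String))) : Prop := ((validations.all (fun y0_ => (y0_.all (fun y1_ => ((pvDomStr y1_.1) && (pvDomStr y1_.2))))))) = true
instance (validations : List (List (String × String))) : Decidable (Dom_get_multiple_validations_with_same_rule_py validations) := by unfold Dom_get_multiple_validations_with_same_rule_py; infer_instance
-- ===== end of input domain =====

-- B replaces A's sort-then-groupby grouping by a single hash-grouping pass (dict.setdefault)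
-- followed by one sort of the distinct rule keys; objective: idiomatic (same result, proved equal).

-- Shared helpers (both Pythons compute str(v["validation_rule"]).strip() and v["validation_action"];
-- the .getD "" arm is unreachable under Pre_, where both keys are present).
def pvRuleKey (v : List (String × String)) : String :=
  PySem.Str.strip (((PySem.Dict.mk v).get? "validation_rule").getD "")

def pvAction (v : List (String × String)) : String :=
  ((PySem.Dict.mk v).get? "validation_action").getD ""

-- ===== PORT A =====
-- itertools.groupby over the sorted list: maximal runs of equal (stripped) rule key.
def pvRunsAux (k : String) (cur : List (List (String × String))) :
    List (List (String × String)) → List (String × List (List (String × String)))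
  | [] => [(k, cur.reverse)]
  | x :: rest =>
    if pvRuleKey x == k then pvRunsAux k (x :: cur) rest
    else (k, cur.reverse) :: pvRunsAux (pvRuleKey x) [x] rest

def pvGroupby : List (List (String × String)) → List (String × List (List (String × String)))
  | [] => []
  | x :: rest => pvRunsAux (pvRuleKey x) [x] rest

def pvValidationGroups (validations : List (List (String × String))) :
    PySem.Dict String (List String) :=
  (pvGroupby (PySem.List.sorted validations pvRuleKey false)).foldl
    (fun d kg => d.insert kg.1 (kg.2.map pvAction)) PySem.Dict.empty

def get_multiple_validations_with_same_rule_py (validations : List (List (String × String))) :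
    List (String × List String) :=
  (((pvValidationGroups validations).items).foldl
    (fun d p => if 1 < p.2.length then d.insert p.1 p.2 else d) PySem.Dict.empty).items

-- ===== PORT B =====
def pvGroups (validations : List (List (String × String))) : PySem.Dict String (List String) :=
  validations.foldl (fun d v => d.modify (pvRuleKey v) [] (· ++ [pvAction v])) PySem.Dict.empty

def get_multiple_validations_with_same_rule_py_alt (validations : List (List (String × String))) :
    List (String × List String) :=
  ((PySem.List.sorted (pvGroups validations).keys (fun k => k) false).foldl
    (fun d k => if 1 < ((pvGroups validations).getD k []).length
      then d.insert k ((pvGroups validations).getD k []) else d)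
    PySem.Dict.empty).items

-- ===== PRECONDITION & SPEC =====
-- Pre_ excludes exactly the inputs where A raises KeyError: some validation dict is missing
-- the "validation_rule" or "validation_action" key.
def Pre_get_multiple_validations_with_same_rule_py (validations : List (List (String × String))) : Prop :=
  ∀ v ∈ validations,
    (PySem.Dict.mk v).contains "validation_rule" = true ∧
    (PySem.Dict.mk v).contains "validation_action" = true
instance (validations : List (List (String × String))) : Decidable (Pre_get_multiple_validations_with_same_rule_py validations) := by unfold Pre_get_multiple_validations_with_same_rule_py; infer_instance

def pvWitness_get_multiple_validations_with_same_rule_py : (List (List (String × String))) :=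
  [[("validation_rule", " r1 "), ("validation_action", "drop")],
   [("validation_rule", "r1"), ("validation_action", "log")],
   [("validation_rule", "r2"), ("validation_action", "fail")]]

def Spec_get_multiple_validations_with_same_rule_py (validations : List (List (String × String))) (out : List (String × List String)) : Prop := out = get_multiple_validations_with_same_rule_py_alt validations
instance (validations : List (List (String × String))) (out : List (String × List String)) : Decidable (Spec_get_multiple_validations_with_same_rule_py validations out) := by unfold Spec_get_multiple_validations_with_same_rule_py; infer_instance

-- ===== CLAIM (what is proved, stated in full; the proofs are below) =====
def Claim_equal_get_multiple_validations_with_same_rule_py : Prop := ∀ (validations : List (List (String × String))), Dom_get_multiple_validations_with_same_rule_py validations → Pre_get_multiple_validations_with_same_rule_py validations → Spec_get_multiple_validations_with_same_rule_py validations (get_multiple_validations_with_same_rule_py validations)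

-- ===== LEMMAS AND PROOFS =====

-- Abbreviation for the group of a key, in original input order.
def pvGroup (xs : List (List (String × String))) (c : String) : List String :=
  (xs.filter (fun v => pvRuleKey v == c)).map pvAction

-- insertBy keeps a Pairwise-≤ list Pairwise ≤.
theorem pv_pairwise_insertBy {α : Type} (key : α → String) (x : α) (ys : List α)
    (h : ys.Pairwise (fun a b => key a ≤ key b)) :
    (PySem.List.insertBy (fun a b => decide (key a < key b)) x ys).Pairwise
      (fun a b => key a ≤ key b) := by
  induction ys with
  | nil => simp [PySem.List.insertBy]
  | cons y t ih =>
    rw [List.pairwise_cons] at h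
    by_cases hlt : key x < key y
    · simp only [PySem.List.insertBy, hlt, decide_true, if_true]
      refine List.pairwise_cons.2 ⟨?_, List.pairwise_cons.2 ⟨h.1, h.2⟩⟩
      intro a ha
      rcases List.mem_cons.1 ha with rfl | ha
      · exact le_of_lt hlt
      · exact le_trans (le_of_lt hlt) (h.1 a ha)
    · simp only [PySem.List.insertBy, hlt, decide_false, if_false]
      refine List.pairwise_cons.2 ⟨?_, ih h.2⟩
      intro a ha
      rcases (PySem.List.mem_insertBy _ _ _ _).1 ha with rfl | ha
      · exact le_of_not_gt hlt
      · exact h.1 a ha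

-- filter by a key value commutes with insertBy when the new element fails the test.
theorem pv_filter_insertBy_neg {α : Type} (before : α → α → Bool) (p : α → Bool) (x : α)
    (ys : List α) (hx : p x = false) :
    (PySem.List.insertBy before x ys).filter p = ys.filter p := by
  induction ys with
  | nil => simp [PySem.List.insertBy, hx]
  | cons y t ih =>
    by_cases hb : before x y
    · simp [PySem.List.insertBy, hb, hx]
    · simp only [PySem.List.insertBy, hb, if_false]
      by_cases hy : p y <;> simp [List.filter_cons, hy, ih]

-- on a Pairwise-≤ list, inserting an element with key c appends it to the c-filter.
theorem pv_filter_insertBy_pos {α : Type} (key : α → String) (x : α) (ys : List α) (c : String)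
    (hx : key x = c) (h : ys.Pairwise (fun a b => key a ≤ key b)) :
    (PySem.List.insertBy (fun a b => decide (key a < key b)) x ys).filter (fun y => key y == c)
      = ys.filter (fun y => key y == c) ++ [x] := by
  induction ys with
  | nil => simp [PySem.List.insertBy, hx]
  | cons y t ih =>
    rw [List.pairwise_cons] at h
    have hstep : PySem.List.insertBy (fun a b => decide (key a < key b)) x (y :: t)
        = if decide (key x < key y) then x :: y :: t
          else y :: PySem.List.insertBy (fun a b => decide (key a < key b)) x t := rfl
    by_cases hlt : key x < key y
    · rw [hstep, if_pos (by simpa using hlt)]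
      have hyc : key y ≠ c := by
        intro hc; rw [← hx] at hc; exact (lt_irrefl _ (hc ▸ hlt)).elim
      have ht : t.filter (fun y => key y == c) = [] := by
        rw [List.filter_eq_nil_iff]
        intro a ha hac
        have : key y ≤ key a := h.1 a ha
        have : key x < key a := lt_of_lt_of_le hlt this
        rw [beq_iff_eq] at hac; rw [← hx] at hac; exact (lt_irrefl _ (hac ▸ this)).elim
      simp [List.filter_cons, hx, beq_iff_eq, hyc, ht]
    · rw [hstep, if_neg (by simpa using hlt), List.filter_cons, ih h.2]
      by_cases hy : (key y == c) = true <;> simp [hy]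

-- stability: filtering one key class out of the sorted list gives the original filter.
theorem pv_filter_sorted (xs : List (List (String × String))) (c : String) :
    (PySem.List.sorted xs pvRuleKey false).filter (fun v => pvRuleKey v == c)
      = xs.filter (fun v => pvRuleKey v == c) := by
  rw [PySem.List.sorted_eq_foldl_insertBy]
  suffices h : ∀ (l acc : List (List (String × String))),
      acc.Pairwise (fun a b => pvRuleKey a ≤ pvRuleKey b) →
      (l.foldl (fun acc x => PySem.List.insertBy (fun a b => decide (pvRuleKey a < pvRuleKey b)) x acc) acc).filter (fun v => pvRuleKey v == c)
        = acc.filter (fun v => pvRuleKey v == c) ++ l.filter (fun v => pvRuleKey v == c) by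
    simpa using h xs [] (by simp)
  intro l
  induction l with
  | nil => intro acc _; simp
  | cons x t ih =>
    intro acc hacc
    rw [List.foldl_cons, ih _ (pv_pairwise_insertBy _ _ _ hacc)]
    by_cases hx : (pvRuleKey x == c) = true
    · rw [pv_filter_insertBy_pos pvRuleKey x acc c (by simpa using hx) hacc]
      simp [List.filter_cons, hx]
    · rw [pv_filter_insertBy_neg _ _ _ _ (by simpa using hx)]
      simp [List.filter_cons, hx]

-- first-occurrence dedup of a cons.
theorem pv_foldl_add_filter {α : Type} [BEq α] [LawfulBEq α] (a : α) :
    ∀ (l : List α) (s : PySem.Set α), a ∈ s →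
      l.foldl PySem.Set.add s = (l.filter (fun x => !(x == a))).foldl PySem.Set.add s := by
  intro l
  induction l with
  | nil => intro s _; rfl
  | cons x t ih =>
    intro s hs
    by_cases hxa : (x == a) = true
    · have hx : x = a := by simpa using hxa
      subst hx
      have hadd : PySem.Set.add s x = s := by
        simp [PySem.Set.add, PySem.Set.contains, List.elem_eq_contains, hs]
      simp [List.filter_cons, hxa, List.foldl_cons, hadd, ih s hs]
    · simp only [List.filter_cons, hxa, Bool.not_false, if_true, List.foldl_cons]
      exact ih _ ((PySem.Set.mem_add s x a).2 (Or.inl hs))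

theorem pv_foldl_add_cons {α : Type} [BEq α] [LawfulBEq α] (a : α) :
    ∀ (l : List α) (s : List α), (∀ x ∈ l, x ≠ a) →
      l.foldl PySem.Set.add (a :: s) = a :: l.foldl PySem.Set.add s := by
  intro l
  induction l with
  | nil => intro s _; rfl
  | cons x t ih =>
    intro s hl
    have hxa : x ≠ a := hl x (by simp)
    have hadd : PySem.Set.add (a :: s) x = a :: PySem.Set.add s x := by
      have hax : (a == x) = false := by simpa using fun h => hxa h.symm
      have hxa' : (x == a) = false := by simpa using hxa
      simp only [PySem.Set.add, PySem.Set.contains, List.contains_cons, hax, hxa',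
        Bool.false_or, Bool.or_false]
      split <;> simp
    rw [List.foldl_cons, hadd, ih _ (fun y hy => hl y (by simp [hy])), List.foldl_cons]

theorem pv_dedup_cons {α : Type} [BEq α] [LawfulBEq α] (a : α) (l : List α) :
    PySem.List.dedup (a :: l) = a :: PySem.List.dedup (l.filter (fun x => !(x == a))) := by
  have h1 : PySem.List.dedup (a :: l) = l.foldl PySem.Set.add [a] := by
    rw [PySem.List.dedup_eq_ofList]
    show List.foldl PySem.Set.add (PySem.Set.add PySem.Set.empty a) l = _
    congr 1
  rw [h1, pv_foldl_add_filter a l [a] (by simp),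
    pv_foldl_add_cons a _ [] (by intro x hx; simpa using (List.mem_filter.1 hx).2),
    PySem.List.dedup_eq_ofList]
  rfl

-- the run decomposition produced by groupby on a Pairwise-≤ list.
theorem pv_runsAux_spec (rest : List (List (String × String))) (k : String)
    (cur : List (List (String × String)))
    (hk : ∀ x ∈ rest, k ≤ pvRuleKey x)
    (h : rest.Pairwise (fun a b => pvRuleKey a ≤ pvRuleKey b)) :
    pvRunsAux k cur rest
      = (k, cur.reverse ++ rest.filter (fun v => pvRuleKey v == k))
        :: (PySem.List.dedup ((rest.filter (fun x => !(pvRuleKey x == k))).map pvRuleKey)).map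
            (fun c => (c, rest.filter (fun v => pvRuleKey v == c))) := by
  induction rest generalizing k cur with
  | nil => simp [pvRunsAux]
  | cons x t ih =>
    rw [List.pairwise_cons] at h
    have hstep : pvRunsAux k cur (x :: t)
        = if pvRuleKey x == k then pvRunsAux k (x :: cur) t
          else (k, cur.reverse) :: pvRunsAux (pvRuleKey x) [x] t := rfl
    by_cases hx : (pvRuleKey x == k) = true
    · have hxk : pvRuleKey x = k := by simpa using hx
      rw [hstep, if_pos hx, ih k (x :: cur) (fun y hy => hxk ▸ h.1 y hy) h.2]
      have hcong : ∀ c ∈ PySem.List.dedup ((t.filter (fun y => !(pvRuleKey y == k))).map pvRuleKey),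
          (fun c => (c, t.filter (fun v => pvRuleKey v == c))) c
            = (fun c => (c, (x :: t).filter (fun v => pvRuleKey v == c))) c := by
        intro c hc
        rw [PySem.List.mem_dedup] at hc
        obtain ⟨y, hy, rfl⟩ := List.mem_map.1 hc
        have : pvRuleKey y ≠ k := by simpa using (List.mem_filter.1 hy).2
        have hxc : (pvRuleKey x == pvRuleKey y) = false := by
          simp [hxk]; intro hcc; exact this hcc.symm
        simp [hxc]
      rw [List.map_congr_left hcong]
      simp [List.filter_cons, hx, hxk]
    · have hlt : k < pvRuleKey x := lt_of_le_of_ne (hk x (by simp)) (by simpa using fun hc => hx (by simp [hc.symm]))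
      have hgt : ∀ y ∈ t, k < pvRuleKey y := fun y hy => lt_of_lt_of_le hlt (h.1 y hy)
      rw [hstep, if_neg (by simpa using hx), ih (pvRuleKey x) [x] (fun y hy => h.1 y hy) h.2]
      have hfk : (x :: t).filter (fun v => pvRuleKey v == k) = [] := by
        rw [List.filter_eq_nil_iff]
        intro y hy hyk
        rcases List.mem_cons.1 hy with rfl | hy
        · exact hx hyk
        · exact absurd (by simpa using hyk : pvRuleKey y = k) (ne_of_gt (hgt y hy))
      have hfnk : (x :: t).filter (fun y => !(pvRuleKey y == k)) = x :: t := by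
        rw [List.filter_eq_self]
        intro y hy
        rcases List.mem_cons.1 hy with rfl | hy
        · simpa using fun hc => hx (by simp [hc])
        · simpa using ne_of_gt (hgt y hy)
      have hmapfilter : (t.map pvRuleKey).filter (fun c => !(c == pvRuleKey x))
          = (t.filter (fun y => !(pvRuleKey y == pvRuleKey x))).map pvRuleKey := by
        rw [List.filter_map]; rfl
      have hcong : ∀ c ∈ PySem.List.dedup ((t.filter (fun y => !(pvRuleKey y == pvRuleKey x))).map pvRuleKey),
          (fun c => (c, t.filter (fun v => pvRuleKey v == c))) c
            = (fun c => (c, (x :: t).filter (fun v => pvRuleKey v == c))) c := by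
        intro c hc
        rw [PySem.List.mem_dedup] at hc
        obtain ⟨y, hy, rfl⟩ := List.mem_map.1 hc
        have : pvRuleKey y ≠ pvRuleKey x := by simpa using (List.mem_filter.1 hy).2
        have hxc : (pvRuleKey x == pvRuleKey y) = false := by
          simp; intro hcc; exact this hcc.symm
        simp [hxc]
      rw [hfk, hfnk, List.map_cons, pv_dedup_cons, hmapfilter, List.map_congr_left hcong]
      simp [List.filter_cons]

theorem pv_groupby_spec (ys : List (List (String × String)))
    (h : ys.Pairwise (fun a b => pvRuleKey a ≤ pvRuleKey b)) :
    pvGroupby ys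
      = (PySem.List.dedup (ys.map pvRuleKey)).map
          (fun c => (c, ys.filter (fun v => pvRuleKey v == c))) := by
  cases ys with
  | nil => rfl
  | cons x t =>
    rw [List.pairwise_cons] at h
    show pvRunsAux (pvRuleKey x) [x] t = _
    rw [pv_runsAux_spec t (pvRuleKey x) [x] (fun y hy => h.1 y hy) h.2]
    have hmapfilter : (t.map pvRuleKey).filter (fun c => !(c == pvRuleKey x))
        = (t.filter (fun y => !(pvRuleKey y == pvRuleKey x))).map pvRuleKey := by
      rw [List.filter_map]; rfl
    have hcong : ∀ c ∈ PySem.List.dedup ((t.filter (fun y => !(pvRuleKey y == pvRuleKey x))).map pvRuleKey),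
        (fun c => (c, t.filter (fun v => pvRuleKey v == c))) c
          = (fun c => (c, (x :: t).filter (fun v => pvRuleKey v == c))) c := by
      intro c hc
      rw [PySem.List.mem_dedup] at hc
      obtain ⟨y, hy, rfl⟩ := List.mem_map.1 hc
      have : pvRuleKey y ≠ pvRuleKey x := by simpa using (List.mem_filter.1 hy).2
      have hxc : (pvRuleKey x == pvRuleKey y) = false := by
        simp; intro hcc; exact this hcc.symm
      simp [hxc]
    rw [List.map_cons, pv_dedup_cons, hmapfilter, List.map_congr_left hcong]
    simp [List.filter_cons]

-- dedup of a Pairwise-≤ list of strings is strictly increasing.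
theorem pv_dedup_pairwise_lt_aux : ∀ (n : Nat) (l : List String), l.length ≤ n →
    l.Pairwise (· ≤ ·) → (PySem.List.dedup l).Pairwise (· < ·) := by
  intro n
  induction n with
  | zero =>
    intro l hl _
    rw [Nat.le_zero, List.length_eq_zero_iff] at hl
    subst hl; simp [PySem.List.dedup]
  | succ n ih =>
    intro l hl hp
    cases l with
    | nil => simp [PySem.List.dedup]
    | cons a t =>
      rw [List.pairwise_cons] at hp
      rw [pv_dedup_cons]
      refine List.pairwise_cons.2 ⟨?_, ?_⟩
      · intro b hb
        rw [PySem.List.mem_dedup] at hb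
        have hm := List.mem_filter.1 hb
        have hba : b ≠ a := by simpa using hm.2
        exact lt_of_le_of_ne (hp.1 b hm.1) hba.symm
      · refine ih _ (le_trans (List.length_filter_le _ _) (by simpa using hl)) (hp.2.filter _)

theorem pv_dedup_pairwise_lt (l : List String) (h : l.Pairwise (· ≤ ·)) :
    (PySem.List.dedup l).Pairwise (· < ·) :=
  pv_dedup_pairwise_lt_aux l.length l le_rfl h

-- the sorted distinct keys equal the dedup of the sorted list's keys.
theorem pv_keys_eq (xs : List (List (String × String))) :
    PySem.List.sorted (PySem.Set.ofList (xs.map pvRuleKey)) (fun k => k) false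
      = PySem.List.dedup ((PySem.List.sorted xs pvRuleKey false).map pvRuleKey) := by
  apply PySem.List.sorted_eq_of_perm_of_pairwise_lt
  · rw [List.perm_ext_iff_of_nodup (PySem.List.nodup_dedup _) (PySem.Set.nodup_ofList _)]
    intro c
    rw [PySem.List.mem_dedup, PySem.Set.mem_ofList, List.mem_map, List.mem_map]
    constructor
    · rintro ⟨v, hv, rfl⟩
      exact ⟨v, (PySem.List.sorted_perm xs pvRuleKey false).mem_iff.1 hv, rfl⟩
    · rintro ⟨v, hv, rfl⟩
      exact ⟨v, (PySem.List.sorted_perm xs pvRuleKey false).mem_iff.2 hv, rfl⟩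
  · exact pv_dedup_pairwise_lt _ (PySem.List.sorted_map_key_pairwise xs pvRuleKey)

-- A's result, in closed form.
theorem pv_a_eq (xs : List (List (String × String))) :
    get_multiple_validations_with_same_rule_py xs
      = ((PySem.List.sorted (PySem.Set.ofList (xs.map pvRuleKey)) (fun k => k) false).filter
          (fun c => 1 < (pvGroup xs c).length)).map (fun c => (c, pvGroup xs c)) := by
  have hpair := PySem.List.sorted_pairwise xs pvRuleKey
  have h1 : (pvValidationGroups xs).items
      = (PySem.List.dedup ((PySem.List.sorted xs pvRuleKey false).map pvRuleKey)).map
          (fun c => (c, ((PySem.List.sorted xs pvRuleKey false).filter (fun v => pvRuleKey v == c)).map pvAction)) := by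
    unfold pvValidationGroups
    rw [pv_groupby_spec _ hpair]
    have hins := PySem.Dict.items_foldl_insert_fresh
      ((PySem.List.dedup ((PySem.List.sorted xs pvRuleKey false).map pvRuleKey)).map
        (fun c => (c, (PySem.List.sorted xs pvRuleKey false).filter (fun v => pvRuleKey v == c))))
      (fun kg => kg.1) (fun kg => kg.2.map pvAction) PySem.Dict.empty
      (fun a _ => PySem.Dict.contains_empty _)
      (by simp [List.map_map, Function.comp_def,
        PySem.List.nodup_dedup ((PySem.List.sorted xs pvRuleKey false).map pvRuleKey)])
    rw [hins]
    simp [List.map_map, Function.comp_def, PySem.Dict.empty]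
  have hKnd : ((PySem.List.dedup ((PySem.List.sorted xs pvRuleKey false).map pvRuleKey)).map
      (fun c => (c, ((PySem.List.sorted xs pvRuleKey false).filter (fun v => pvRuleKey v == c)).map pvAction))).map Prod.fst
        |>.Nodup := by
    simp [List.map_map, Function.comp_def,
      PySem.List.nodup_dedup ((PySem.List.sorted xs pvRuleKey false).map pvRuleKey)]
  unfold get_multiple_validations_with_same_rule_py
  have hconv := PySem.List.foldl_ite_eq_foldl_filter
    (fun q : String × List String => 1 < q.2.length) (fun d q => d.insert q.1 q.2)
    ((PySem.List.dedup ((PySem.List.sorted xs pvRuleKey false).map pvRuleKey)).map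
      (fun c => (c, ((PySem.List.sorted xs pvRuleKey false).filter (fun v => pvRuleKey v == c)).map pvAction)))
    (PySem.Dict.empty : PySem.Dict String (List String))
  rw [h1, hconv]
  have hins2 := PySem.Dict.items_foldl_insert_fresh
    (((PySem.List.dedup ((PySem.List.sorted xs pvRuleKey false).map pvRuleKey)).map
        (fun c => (c, ((PySem.List.sorted xs pvRuleKey false).filter (fun v => pvRuleKey v == c)).map pvAction))).filter
      (fun p => decide (1 < (Prod.snd p).length)))
    Prod.fst Prod.snd PySem.Dict.empty
    (fun a _ => PySem.Dict.contains_empty _)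
    (List.Nodup.sublist (List.Sublist.map _ List.filter_sublist) hKnd)
  rw [hins2, List.filter_map]
  have hgrp : ∀ c : String,
      ((PySem.List.sorted xs pvRuleKey false).filter (fun v => pvRuleKey v == c)).map pvAction
        = pvGroup xs c := by
    intro c; rw [pv_filter_sorted]; rfl
  simp only [List.map_map, Function.comp_def, hgrp, PySem.Dict.empty, pv_keys_eq]
  simp

-- B's result, in the same closed form.
theorem pv_b_eq (xs : List (List (String × String))) :
    get_multiple_validations_with_same_rule_py_alt xs
      = ((PySem.List.sorted (PySem.Set.ofList (xs.map pvRuleKey)) (fun k => k) false).filter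
          (fun c => 1 < (pvGroup xs c).length)).map (fun c => (c, pvGroup xs c)) := by
  have hfold : pvGroups xs
      = (xs.map (fun v => (pvRuleKey v, pvAction v))).foldl
          (fun d p => d.modify p.1 [] (· ++ [p.2])) PySem.Dict.empty := by
    unfold pvGroups
    rw [List.foldl_map]
  have hgd : ∀ c, (pvGroups xs).getD c [] = pvGroup xs c := by
    intro c
    rw [hfold, PySem.Dict.getD_foldl_modify_append]
    simp [pvGroup, List.filter_map, List.map_map, Function.comp_def]
  have hkeys : (pvGroups xs).keys = PySem.Set.ofList (xs.map pvRuleKey) := by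
    unfold pvGroups
    rw [PySem.Dict.keys_foldl_modify_key xs pvRuleKey [] (fun _ v val => val ++ [pvAction v])
      PySem.Dict.empty, PySem.Dict.keys_empty]
    rfl
  have hKnd : (PySem.List.sorted (PySem.Set.ofList (xs.map pvRuleKey)) (fun k => k) false).Nodup :=
    ((PySem.List.sorted_perm _ _ _).symm).nodup (PySem.Set.nodup_ofList _)
  unfold get_multiple_validations_with_same_rule_py_alt
  simp only [hgd, hkeys]
  have hconv := PySem.List.foldl_ite_eq_foldl_filter
    (fun k : String => 1 < (pvGroup xs k).length) (fun d k => d.insert k (pvGroup xs k))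
    (PySem.List.sorted (PySem.Set.ofList (xs.map pvRuleKey)) (fun k => k) false)
    (PySem.Dict.empty : PySem.Dict String (List String))
  rw [hconv]
  have hins := PySem.Dict.items_foldl_insert_fresh
    ((PySem.List.sorted (PySem.Set.ofList (xs.map pvRuleKey)) (fun k => k) false).filter
      (fun k => decide (1 < (pvGroup xs k).length)))
    (fun k => k) (fun k => pvGroup xs k) PySem.Dict.empty
    (fun a _ => PySem.Dict.contains_empty _)
    (by simpa [List.map_id'] using List.Nodup.sublist List.filter_sublist hKnd)
  rw [hins]
  simp [PySem.Dict.empty]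

-- ===== VERDICT (by name: the statement is the Claim_ definition above) =====
theorem get_multiple_validations_with_same_rule_py_spec : Claim_equal_get_multiple_validations_with_same_rule_py := by
  intro xs _ _
  unfold Spec_get_multiple_validations_with_same_rule_py
  rw [pv_a_eq, pv_b_eq]
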